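-- pv_equiv track=rewrite | github.com/Arsen1302/Code-copy-detector | TestData/solutions/problem_1655_3.py | solution_1655_3
-- ===== SOURCE A (Python) =====
-- from typing import List
--
-- def solution_1655_3(nums: List[int]) -> bool:
--     all_sums = []
--     for i in range(0, len(nums) - 1):
--         if nums[i] + nums[i + 1] in all_sums:
--             return True
--         else:
--             all_sums.append(nums[i] + nums[i + 1])
--
--     return False
-- ===== SOURCE B (Python) =====
-- def solution_1655_3(nums):
--     sums = sorted(a + b for a, b in zip(nums, nums[1:]))
--     return any(x == y for x, y in zip(sums, sums[1:]))
-- ===== Notes on version B (the rewrite author's own statement) =====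
-- stated objective: alternative
-- what changed: Replaces A's early-exit scan with an incremental membership list by a sort-then-scan strategy: build all adjacent-pair sums, sort them, and report whether any two adjacent sorted sums are equal (duplicates become neighbours after sorting).
import Mathlib
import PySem

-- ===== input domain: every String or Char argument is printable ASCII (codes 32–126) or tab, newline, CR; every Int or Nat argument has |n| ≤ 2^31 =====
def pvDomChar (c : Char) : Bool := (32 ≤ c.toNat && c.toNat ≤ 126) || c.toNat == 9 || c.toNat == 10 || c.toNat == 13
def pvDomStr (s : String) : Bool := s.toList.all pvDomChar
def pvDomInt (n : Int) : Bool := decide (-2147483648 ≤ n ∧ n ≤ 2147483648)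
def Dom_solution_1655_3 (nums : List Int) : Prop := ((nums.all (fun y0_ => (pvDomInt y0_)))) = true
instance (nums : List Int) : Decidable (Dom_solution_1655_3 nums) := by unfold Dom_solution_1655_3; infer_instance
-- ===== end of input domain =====

-- B replaces A's early-exit membership scan by sort-then-scan: sort the adjacent-pair
-- sums and report whether any two neighbours in the sorted list are equal.


-- ===== PORT A =====
-- A's loop 'for i in range(0, len(nums)-1)' reads exactly nums[i], nums[i+1] at each
-- step; it is transliterated as structural recursion over the adjacent pairs with the
-- same accumulator all_sums (same values in the same order; indices always in range).
def solution_1655_3_loop : List Int → List Int → Bool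
  | a :: b :: rest, all_sums =>
    if a + b ∈ all_sums then true
    else solution_1655_3_loop (b :: rest) (all_sums ++ [a + b])
  | _, _ => false

def solution_1655_3 (nums : List Int) : Bool :=
  solution_1655_3_loop nums []

-- ===== PORT B =====
-- sums = sorted(a + b for a, b in zip(nums, nums[1:])); any(x == y for x, y in zip(sums, sums[1:]))
def solution_1655_3_alt (nums : List Int) : Bool :=
  let sums := PySem.List.sorted ((nums.zip (nums.drop 1)).map (fun p => p.1 + p.2)) (fun x => x) false
  (sums.zip (sums.drop 1)).any (fun p => p.1 == p.2)

-- ===== PRECONDITION & SPEC =====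
def Spec_solution_1655_3 (nums : List Int) (out : Bool) : Prop := out = solution_1655_3_alt nums
instance (nums : List Int) (out : Bool) : Decidable (Spec_solution_1655_3 nums out) := by unfold Spec_solution_1655_3; infer_instance

-- ===== CLAIM (what is proved, stated in full; the proofs are below) =====
def Claim_equal_solution_1655_3 : Prop := ∀ (nums : List Int), Dom_solution_1655_3 nums → Spec_solution_1655_3 nums (solution_1655_3 nums)

-- ===== LEMMAS AND PROOFS =====

-- A's loop decides whether acc ++ (adjacent-pair sums of l) has a duplicate, as long as acc itself has none.
theorem loop_eq_not_nodup (l acc : List Int) (hacc : acc.Nodup) :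
    solution_1655_3_loop l acc
      = !decide ((acc ++ (l.zip (l.drop 1)).map (fun p => p.1 + p.2)).Nodup) := by
  induction l, acc using solution_1655_3_loop.induct with
  | case1 a b rest acc hmem =>
    simp only [solution_1655_3_loop, if_pos hmem, List.drop_succ_cons, List.drop_zero,
      List.zip_cons_cons, List.map_cons]
    have hnd : ¬ (acc ++ (a + b) :: List.map (fun p => p.1 + p.2) ((b :: rest).zip rest)).Nodup := by
      intro h
      exact (List.nodup_append.mp h).2.2 (a + b) hmem (a + b) (by simp) rfl
    simp [hnd]
  | case2 a b rest acc hmem ih =>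
    have hacc' : (acc ++ [a + b]).Nodup := by
      rw [List.nodup_append]
      refine ⟨hacc, List.nodup_singleton _, fun x hx y hy he => hmem ?_⟩
      rw [List.mem_singleton] at hy
      rw [← hy, ← he]
      exact hx
    simp only [solution_1655_3_loop, if_neg hmem, ih hacc', List.drop_succ_cons,
      List.drop_zero, List.zip_cons_cons, List.map_cons]
    simp [List.append_assoc]
  | case3 l acc h =>
    rcases l with _ | ⟨a, _ | ⟨b, t⟩⟩
    · simp [solution_1655_3_loop, hacc]
    · simp [solution_1655_3_loop, hacc]
    · exact (h a b t rfl).elim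

-- On a (≤)-sorted list, some adjacent pair is equal exactly when the list has a duplicate.
theorem any_adj_eq_of_pairwise (l : List Int) (h : l.Pairwise (· ≤ ·)) :
    (l.zip (l.drop 1)).any (fun p => p.1 == p.2) = !decide l.Nodup := by
  induction l with
  | nil => simp
  | cons a t ih =>
    cases t with
    | nil => simp
    | cons b rest =>
      have h' := (List.pairwise_cons.mp h).2
      have hab : a ≤ b := (List.pairwise_cons.mp h).1 b (by simp)
      by_cases he : a = b
      · have : ¬ (a :: b :: rest).Nodup := by
          intro hnd
          exact (List.nodup_cons.mp hnd).1 (by simp [he])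
        simp [he]
      · have hnm : a ∉ b :: rest := by
          intro hmem
          rcases List.mem_cons.mp hmem with h1 | h2
          · exact he h1
          · have hbx : b ≤ a := by
              have := (List.pairwise_cons.mp h').1 a h2
              exact this
            exact he (le_antisymm hab hbx)
        have : (a :: b :: rest).Nodup ↔ (b :: rest).Nodup := by
          simp [List.nodup_cons, hnm]
        simp only [List.drop_succ_cons, List.drop_zero, List.zip_cons_cons, List.any_cons]
        have ihr := ih h'
        simp only [List.drop_succ_cons, List.drop_zero] at ihr
        simp [he, ihr, this]

-- ===== VERDICT (by name: the statement is the Claim_ definition above) =====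
theorem solution_1655_3_spec : Claim_equal_solution_1655_3 := by
  intro nums _
  unfold Spec_solution_1655_3 solution_1655_3 solution_1655_3_alt
  rw [loop_eq_not_nodup nums [] List.nodup_nil]
  simp only [List.nil_append]
  set s := (nums.zip (nums.drop 1)).map (fun p => p.1 + p.2) with hs
  have hpw : (PySem.List.sorted s (fun x => x) false).Pairwise (· ≤ ·) :=
    PySem.List.sorted_pairwise s (fun x => x)
  rw [any_adj_eq_of_pairwise _ hpw]
  have hperm : (PySem.List.sorted s (fun x => x) false).Perm s :=
    PySem.List.sorted_perm s (fun x => x) false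
  simp [hperm.nodup_iff]
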